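-- pv_equiv track=rewrite | github.com/hecris/EPIJudge | epi_judge_python/sort_increasing_decreasing_array.py | sort_k_increasing_decreasing_array
-- ===== SOURCE A (Python) =====
-- from typing import List
-- import heapq
--
-- def sort_k_increasing_decreasing_array(A: List[int]) -> List[int]:
--     # make iterators for sorted subarrays
--     itrs = []
--     start = 0
--     increasing = True
--     for i in range(len(A) - 1):
--         if increasing and not A[i] < A[i+1]:
--             itrs.append(iter(range(start, i+1)))
--             start = i+1
--             increasing = False
--         elif not increasing and not A[i] > A[i+1]:
--             itrs.append(iter(reversed(range(start, i+1))))
--             start = i+1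
--             increasing = True
--
--     if increasing:
--         itrs.append(iter(range(start, len(A))))
--     else:
--         itrs.append(iter(reversed(range(start, len(A)))))
--
--     # merge k sorted subarrays using the iterators
--     heap = [(A[next(itr)], i) for i, itr in enumerate(itrs)]
--     heapq.heapify(heap)
--     res = []
--
--     while heap:
--         val, itr_idx = heapq.heappop(heap)
--         itr = itrs[itr_idx]
--         res.append(val)
--         next_idx = next(itr, None)
--         if next_idx is not None:
--             heapq.heappush(heap, (A[next_idx], itr_idx))
--
--     return res
-- ===== SOURCE B (Python) =====
-- def sort_k_increasing_decreasing_array(A):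
--     return sorted(A)
-- ===== Notes on version B (the rewrite author's own statement) =====
-- stated objective: simpler
-- what changed: Replaced the run-detection plus heapq k-way merge of iterators by a single built-in sort, which yields the identical nondecreasing arrangement of the same integers.
import Mathlib
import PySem

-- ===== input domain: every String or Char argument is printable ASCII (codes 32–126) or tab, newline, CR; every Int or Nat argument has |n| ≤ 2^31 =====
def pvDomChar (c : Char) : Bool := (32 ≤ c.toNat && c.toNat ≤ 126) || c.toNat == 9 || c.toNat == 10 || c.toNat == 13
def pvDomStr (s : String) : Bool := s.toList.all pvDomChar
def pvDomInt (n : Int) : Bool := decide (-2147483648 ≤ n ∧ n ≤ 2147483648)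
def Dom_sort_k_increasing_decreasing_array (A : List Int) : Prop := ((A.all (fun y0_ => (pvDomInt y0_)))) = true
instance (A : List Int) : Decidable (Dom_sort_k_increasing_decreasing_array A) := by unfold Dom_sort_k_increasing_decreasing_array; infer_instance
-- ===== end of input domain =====

-- B replaces the run-detection + heapq k-way merge by a single built-in sort (same return value).


-- ===== PORT A =====

-- A[j] (indices produced by the run detection are always in range; 0 is a dummy default)
def pvVal (A : List Int) (j : Int) : Int := PySem.List.pyGetD A j 0

-- one iteration of the run-detection loop 'for i in range(len(A) - 1)'; state = (itrs, start, increasing)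
def pvStep (A : List Int) (st : List (List Int) × Int × Bool) (i : Int) : List (List Int) × Int × Bool :=
  if st.2.2 && !(decide (pvVal A i < pvVal A (i + 1))) then
    (st.1 ++ [PySem.List.pyRange st.2.1 (i + 1)], i + 1, false)
  else if !st.2.2 && !(decide (pvVal A i > pvVal A (i + 1))) then
    (st.1 ++ [(PySem.List.pyRange st.2.1 (i + 1)).reverse], i + 1, true)
  else st

-- the list of index runs (each Python iterator, materialised as the index sequence it yields)
def pvRuns (A : List Int) : List (List Int) :=
  let st := (PySem.List.pyRange 0 (PySem.List.len A - 1)).foldl (pvStep A) ([], 0, true)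
  if st.2.2 then st.1 ++ [PySem.List.pyRange st.2.1 (PySem.List.len A)]
  else st.1 ++ [(PySem.List.pyRange st.2.1 (PySem.List.len A)).reverse]

-- lexicographic ≤ on the heap entries (val, itr_idx), exactly Python's tuple comparison
def pvLexLe (x y : Int × Nat) : Bool :=
  decide (x.1 < y.1) || (decide (x.1 = y.1) && decide (x.2 ≤ y.2))

-- heapq modelled by its contract: heappop returns the lexicographically least tuple
-- (exact here: the itr_idx keys in the heap are distinct, so the minimum is unique);
-- pvPopMin x t = (least element of x :: t, the remaining elements)
def pvPopMin : (Int × Nat) → List (Int × Nat) → ((Int × Nat) × List (Int × Nat))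
  | x, [] => (x, [])
  | x, y :: t =>
    if pvLexLe x y then
      let p := pvPopMin x t; (p.1, y :: p.2)
    else
      let p := pvPopMin y t; (p.1, x :: p.2)

-- (termination helpers for pvMerge, cited in its decreasing_by)
lemma pvPopMin_length (x : Int × Nat) (t : List (Int × Nat)) :
    (pvPopMin x t).2.length = t.length := by
  induction t generalizing x with
  | nil => rfl
  | cons y t ih =>
    simp only [pvPopMin]
    split <;> simp [ih]

lemma pv_sum_set {rem : List (List Int)} {k : Nat} {j : Int} {js : List Int}
    (h : rem.getD k [] = j :: js) :
    ((rem.set k js).map List.length).sum + 1 = (rem.map List.length).sum := by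
  induction rem generalizing k with
  | nil => simp at h
  | cons r rs ih =>
    cases k with
    | zero =>
      simp only [List.getD_eq_getElem?_getD] at h
      simp at h
      simp [h]
      omega
    | succ k =>
      have := ih (k := k) (by simpa [List.getD_eq_getElem?_getD] using h)
      simp only [List.set, List.map, List.sum_cons]
      omega

-- the merge loop: pop the least (val, itr_idx), append val, advance iterator itr_idx
def pvMerge (A : List Int) (rem : List (List Int)) (heap : List (Int × Nat)) (res : List Int) :
    List Int :=
  match heap with
  | [] => res
  | x :: t =>
    let p := pvPopMin x t
    match hrem : rem.getD p.1.2 [] with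
    | [] => pvMerge A rem p.2 (res ++ [p.1.1])
    | j :: js => pvMerge A (rem.set p.1.2 js) (p.2 ++ [(pvVal A j, p.1.2)]) (res ++ [p.1.1])
termination_by heap.length + (rem.map List.length).sum
decreasing_by
  · simp [pvPopMin_length]
  · have h1 := pvPopMin_length x t
    have h2 := pv_sum_set (show rem.getD (pvPopMin x t).1.2 [] = j :: js from hrem)
    simp only [List.length_append, List.length_cons, List.length_nil, pvPopMin_length]
    omega

def sort_k_increasing_decreasing_array (A : List Int) : List Int :=
  let itrs := pvRuns A
  -- heap = [(A[next(itr)], i) …]: next(itr) = the head of run i (runs are nonempty exactly when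
  -- A ≠ []; on A = [] Python raises StopIteration, excluded by Pre_; headD's default is a dummy).
  -- enumerate yields indices 0,1,…; they are nonnegative, kept as Nat.
  let heap := (PySem.List.enumerate itrs).map (fun p => (pvVal A (p.2.headD 0), p.1.toNat))
  -- the iterators after their first next(): the tails of the runs
  let rem := itrs.map (fun r => r.drop 1)
  pvMerge A rem heap []

-- ===== PORT B =====
def sort_k_increasing_decreasing_array_alt (A : List Int) : List Int :=
  PySem.List.sorted A (fun x => x) false

-- ===== PRECONDITION & SPEC =====
-- A raises StopIteration on the empty list (next() on the iterator of the empty final run).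
def Pre_sort_k_increasing_decreasing_array (A : List Int) : Prop := A ≠ []
instance (A : List Int) : Decidable (Pre_sort_k_increasing_decreasing_array A) := by
  unfold Pre_sort_k_increasing_decreasing_array; infer_instance
def pvWitness_sort_k_increasing_decreasing_array : List Int := [2, 1, 3]

def Spec_sort_k_increasing_decreasing_array (A : List Int) (out : List Int) : Prop :=
  out = sort_k_increasing_decreasing_array_alt A
instance (A : List Int) (out : List Int) :
    Decidable (Spec_sort_k_increasing_decreasing_array A out) := by
  unfold Spec_sort_k_increasing_decreasing_array; infer_instance

-- ===== CLAIM (what is proved, stated in full; the proofs are below) =====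
def Claim_equal_sort_k_increasing_decreasing_array : Prop :=
  ∀ (A : List Int), Dom_sort_k_increasing_decreasing_array A →
    Pre_sort_k_increasing_decreasing_array A →
    Spec_sort_k_increasing_decreasing_array A (sort_k_increasing_decreasing_array A)

-- ===== LEMMAS AND PROOFS =====

-- ---- pvLexLe / pvPopMin ----

lemma pvLexLe_refl (x : Int × Nat) : pvLexLe x x = true := by simp [pvLexLe]

lemma pvLexLe_total {x y : Int × Nat} (h : pvLexLe x y = false) : pvLexLe y x = true := by
  simp [pvLexLe] at *; omega

lemma pvLexLe_trans {x y z : Int × Nat} (h1 : pvLexLe x y = true) (h2 : pvLexLe y z = true) :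
    pvLexLe x z = true := by
  simp [pvLexLe] at *; omega

lemma pvLexLe_val {x y : Int × Nat} (h : pvLexLe x y = true) : x.1 ≤ y.1 := by
  simp [pvLexLe] at h; omega

lemma pvPopMin_perm (x : Int × Nat) (t : List (Int × Nat)) :
    ((pvPopMin x t).1 :: (pvPopMin x t).2).Perm (x :: t) := by
  induction t generalizing x with
  | nil => simp [pvPopMin]
  | cons y t ih =>
    simp only [pvPopMin]
    split
    · exact ((List.Perm.swap y _ _).trans ((ih x).cons y)).trans (List.Perm.swap x y t)
    · exact (List.Perm.swap x _ _).trans ((ih y).cons x)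

lemma pvPopMin_least (x : Int × Nat) (t : List (Int × Nat)) :
    ∀ z ∈ x :: t, pvLexLe (pvPopMin x t).1 z = true := by
  induction t generalizing x with
  | nil =>
    intro z hz
    rcases List.mem_cons.mp hz with rfl | hz'
    · exact pvLexLe_refl z
    · simp at hz'
  | cons y t ih =>
    intro z hz
    simp only [pvPopMin]
    split
    · rename_i hxy
      rcases List.mem_cons.mp hz with rfl | hz'
      · exact ih z z (by simp)
      rcases List.mem_cons.mp hz' with rfl | hz''
      · exact pvLexLe_trans (ih x x (by simp)) hxy
      · exact ih x z (by simp [hz''])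
    · rename_i hxy
      have hyx := pvLexLe_total (by simpa using hxy)
      rcases List.mem_cons.mp hz with rfl | hz'
      · exact pvLexLe_trans (ih y y (by simp)) hyx
      rcases List.mem_cons.mp hz' with rfl | hz''
      · exact ih z z (by simp)
      · exact ih y z (by simp [hz''])

lemma pvPopMin_mem (x : Int × Nat) (t : List (Int × Nat)) {z : Int × Nat}
    (hz : z ∈ (pvPopMin x t).2) : z ∈ x :: t :=
  (pvPopMin_perm x t).subset (by simp [hz])

-- ---- monotone chains on ranges ----

lemma pv_mono_on_range {f : Int → Int} {a b : Int}
    (h : ∀ j, a ≤ j → j + 1 < b → f j ≤ f (j + 1)) :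
    ∀ i j, a ≤ i → i ≤ j → j < b → f i ≤ f j := by
  intro i j hai hij hjb
  have key : ∀ d : Nat, ∀ i j : Int, a ≤ i → i ≤ j → j < b → (j - i).toNat = d → f i ≤ f j := by
    intro d
    induction d with
    | zero =>
      intro i j h1 h2 h3 h4
      exact le_of_eq (congrArg f (by omega))
    | succ d ihd =>
      intro i j h1 h2 h3 h4
      exact le_trans (h i h1 (by omega)) (ihd (i + 1) j (by omega) (by omega) h3 (by omega))
  exact key (j - i).toNat i j hai hij hjb rfl

lemma pv_pairwise_map_pyRange {f : Int → Int} {a b : Int}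
    (h : ∀ j, a ≤ j → j + 1 < b → f j ≤ f (j + 1)) :
    ((PySem.List.pyRange a b).map f).Pairwise (· ≤ ·) := by
  rw [List.pairwise_map]
  have key : ∀ (d : Nat) (a : Int), (b - a).toNat = d →
      (∀ j, a ≤ j → j + 1 < b → f j ≤ f (j + 1)) →
      (PySem.List.pyRange a b).Pairwise (fun i j => f i ≤ f j) := by
    intro d
    induction d with
    | zero =>
      intro a hd _
      have : ¬ a < b := by omega
      simp [PySem.List.pyRange, this]
    | succ d ihd =>
      intro a hd ha
      rw [PySem.List.pyRange_one_cons (by omega)]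
      refine List.pairwise_cons.mpr ⟨?_, ihd (a + 1) (by omega) (fun j h1 h2 => ha j (by omega) h2)⟩
      intro y hy
      have hy' := PySem.List.mem_pyRange_one.mp hy
      exact pv_mono_on_range ha a y le_rfl (by omega) (by omega)
  exact key (b - a).toNat a rfl h

lemma pv_pairwise_map_pyRange_rev {f : Int → Int} {a b : Int}
    (h : ∀ j, a ≤ j → j + 1 < b → f (j + 1) ≤ f j) :
    (((PySem.List.pyRange a b).reverse).map f).Pairwise (· ≤ ·) := by
  rw [List.map_reverse, List.pairwise_reverse]
  have := pv_pairwise_map_pyRange (f := fun j => - f j) (a := a) (b := b)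
    (fun j h1 h2 => show -f j ≤ -f (j + 1) by have := h j h1 h2; omega)
  rw [List.pairwise_map] at this ⊢
  exact this.imp (fun hx => by simp at hx; omega)

-- ---- the run-detection invariant ----

def pvInv (A : List Int) (t : Int) (st : List (List Int) × Int × Bool) : Prop :=
  0 ≤ st.2.1 ∧ st.2.1 ≤ t ∧
  st.1.flatten.Perm (PySem.List.pyRange 0 st.2.1) ∧
  (∀ r ∈ st.1, r ≠ [] ∧ (r.map (pvVal A)).Pairwise (· ≤ ·)) ∧
  (∀ j, st.2.1 ≤ j → j + 1 ≤ t →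
    (if st.2.2 then pvVal A j < pvVal A (j + 1) else pvVal A j > pvVal A (j + 1)))

lemma pvInv_step {A : List Int} {t : Int} {st : List (List Int) × Int × Bool}
    (ht : 0 ≤ t) (hI : pvInv A t st) : pvInv A (t + 1) (pvStep A st t) := by
  obtain ⟨h0, h1, h2, h3, h4⟩ := hI
  unfold pvStep
  split
  · rename_i hc
    have hc' : st.2.2 = true ∧ ¬ pvVal A t < pvVal A (t + 1) := by
      simpa using hc
    refine ⟨by dsimp only; omega, by dsimp only; omega, ?_, ?_, ?_⟩
    · rw [List.flatten_append, List.flatten_cons, List.flatten_nil, List.append_nil]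
      exact (h2.append_right _).trans
        (List.Perm.of_eq (PySem.List.pyRange_one_append 0 st.2.1 (t + 1) h0 (by omega)).symm)
    · intro r hr
      rcases List.mem_append.mp hr with hr' | hr'
      · exact h3 r hr'
      · have hr'' : r = PySem.List.pyRange st.2.1 (t + 1) := by simpa using hr'
        subst hr''
        refine ⟨by rw [PySem.List.pyRange_one_cons (by omega)]; simp, ?_⟩
        refine pv_pairwise_map_pyRange (fun j hj1 hj2 => ?_)
        have := h4 j hj1 (by omega)
        rw [hc'.1] at this
        simp at this
        omega
    · intro j hj1 hj2
      dsimp only at hj1 hj2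
      omega
  · rename_i hc
    split
    · rename_i hc2
      have hc2' : st.2.2 = false ∧ ¬ pvVal A t > pvVal A (t + 1) := by
        simpa using hc2
      refine ⟨by dsimp only; omega, by dsimp only; omega, ?_, ?_, ?_⟩
      · rw [List.flatten_append, List.flatten_cons, List.flatten_nil, List.append_nil]
        exact ((h2.append ((PySem.List.pyRange st.2.1 (t + 1)).reverse_perm)).trans
          (List.Perm.of_eq (PySem.List.pyRange_one_append 0 st.2.1 (t + 1) h0 (by omega)).symm))
      · intro r hr
        rcases List.mem_append.mp hr with hr' | hr'
        · exact h3 r hr'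
        · have hr'' : r = (PySem.List.pyRange st.2.1 (t + 1)).reverse := by simpa using hr'
          subst hr''
          refine ⟨by rw [PySem.List.pyRange_one_cons (by omega)]; simp, ?_⟩
          refine pv_pairwise_map_pyRange_rev (fun j hj1 hj2 => ?_)
          have := h4 j hj1 (by omega)
          rw [hc2'.1] at this
          simp at this
          omega
      · intro j hj1 hj2
        dsimp only at hj1 hj2
        omega
    · rename_i hc2
      refine ⟨h0, by omega, h2, h3, ?_⟩
      intro j hj1 hj2
      cases hst : st.2.2 with
      | false =>
        have key : pvVal A j > pvVal A (j + 1) := by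
          by_cases hjt : j + 1 ≤ t
          · have := h4 j hj1 hjt; rw [hst] at this; simpa using this
          · have hj : j = t := by omega
            subst hj
            by_contra hgt
            exact hc2 (by simp [hst, hgt])
        simpa [hst] using key
      | true =>
        have key : pvVal A j < pvVal A (j + 1) := by
          by_cases hjt : j + 1 ≤ t
          · have := h4 j hj1 hjt; rw [hst] at this; simpa using this
          · have hj : j = t := by omega
            subst hj
            by_contra hgt
            exact hc (by simp [hst, hgt])
        simpa [hst] using key

lemma pv_fold_inv (A : List Int) (m : Nat) :
    pvInv A (m : Int) (((List.range m).map Int.ofNat).foldl (pvStep A) ([], 0, true)) := by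
  induction m with
  | zero =>
    refine ⟨le_rfl, le_rfl, ?_, by simp, ?_⟩
    · simp [PySem.List.pyRange]
    · intro j hj1 hj2
      simp at hj1 hj2 ⊢
      omega
  | succ m ih =>
    rw [List.range_succ, List.map_append, List.foldl_append]
    have := pvInv_step (t := (m : Int)) (by positivity) ih
    simpa [List.foldl] using this

lemma pvRuns_spec {A : List Int} (hA : A ≠ []) :
    (∀ r ∈ pvRuns A, r ≠ [] ∧ (r.map (pvVal A)).Pairwise (· ≤ ·)) ∧
    (pvRuns A).flatten.Perm (PySem.List.pyRange 0 (PySem.List.len A)) := by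
  have hn : 1 ≤ A.length := by
    cases A with
    | nil => exact absurd rfl hA
    | cons a l => simp
  have hlen : PySem.List.len A = (A.length : Int) := rfl
  have hrange : PySem.List.pyRange 0 (PySem.List.len A - 1) =
      (List.range (A.length - 1)).map Int.ofNat := by
    rw [hlen, show (A.length : Int) - 1 = ((A.length - 1 : Nat) : Int) by omega]
    exact PySem.List.pyRange_zero_natCast (A.length - 1)
  unfold pvRuns
  rw [hrange]
  have hI := pv_fold_inv A (A.length - 1)
  set st := ((List.range (A.length - 1)).map Int.ofNat).foldl (pvStep A) ([], 0, true)
    with hst_def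
  obtain ⟨h0, h1, h2, h3, h4⟩ := hI
  have h1' : st.2.1 ≤ (A.length : Int) - 1 := by omega
  dsimp only
  split
  · rename_i hb
    constructor
    · intro r hr
      rcases List.mem_append.mp hr with hr' | hr'
      · exact h3 r hr'
      · have hr'' : r = PySem.List.pyRange st.2.1 (PySem.List.len A) := by simpa using hr'
        subst hr''
        refine ⟨by rw [PySem.List.pyRange_one_cons (by rw [hlen]; omega)]; simp, ?_⟩
        refine pv_pairwise_map_pyRange (fun j hj1 hj2 => ?_)
        rw [hlen] at hj2
        have := h4 j hj1 (by omega)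
        rw [hb] at this
        simp at this
        omega
    · rw [List.flatten_append, List.flatten_cons, List.flatten_nil, List.append_nil]
      exact (h2.append_right _).trans
        (List.Perm.of_eq (PySem.List.pyRange_one_append 0 st.2.1 (PySem.List.len A) h0
          (by rw [hlen]; omega)).symm)
  · rename_i hb
    have hb' : st.2.2 = false := by simpa using hb
    constructor
    · intro r hr
      rcases List.mem_append.mp hr with hr' | hr'
      · exact h3 r hr'
      · have hr'' : r = (PySem.List.pyRange st.2.1 (PySem.List.len A)).reverse := by simpa using hr'
        subst hr''
        refine ⟨by rw [PySem.List.pyRange_one_cons (by rw [hlen]; omega)]; simp, ?_⟩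
        refine pv_pairwise_map_pyRange_rev (fun j hj1 hj2 => ?_)
        rw [hlen] at hj2
        have := h4 j hj1 (by omega)
        rw [hb'] at this
        simp at this
        omega
    · rw [List.flatten_append, List.flatten_cons, List.flatten_nil, List.append_nil]
      exact ((h2.append ((PySem.List.pyRange st.2.1 (PySem.List.len A)).reverse_perm)).trans
        (List.Perm.of_eq (PySem.List.pyRange_one_append 0 st.2.1 (PySem.List.len A) h0
          (by rw [hlen]; omega)).symm))

lemma pv_getD_mem {rem : List (List Int)} {k : Nat} (hk : k < rem.length) :
    rem.getD k [] ∈ rem := by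
  rw [List.getD_eq_getElem?_getD, List.getElem?_eq_getElem hk]
  exact List.getElem_mem hk

lemma pv_getD_set_self {rem : List (List Int)} {k : Nat} (hk : k < rem.length)
    (b : List Int) : (rem.set k b).getD k [] = b := by
  rw [List.getD_eq_getElem?_getD, List.getElem?_set_self hk]
  rfl

lemma pv_getD_set_ne {rem : List (List Int)} {k k' : Nat} (h : k ≠ k') (b : List Int) :
    (rem.set k b).getD k' [] = rem.getD k' [] := by
  rw [List.getD_eq_getElem?_getD, List.getElem?_set_ne h, ← List.getD_eq_getElem?_getD]

lemma pv_getD_ne_nil_lt {rem : List (List Int)} {k : Nat} (h : rem.getD k [] ≠ []) :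
    k < rem.length := by
  by_contra hk
  rw [List.getD_eq_getElem?_getD, List.getElem?_eq_none (by omega)] at h
  simp at h

lemma pv_flatten_set {l : List (List Int)} {k : Nat} {j : Int} {js : List Int}
    (h : l.getD k [] = j :: js) : l.flatten.Perm (j :: (l.set k js).flatten) := by
  induction l generalizing k with
  | nil => simp [List.getD_eq_getElem?_getD] at h
  | cons r rs ih =>
    cases k with
    | zero =>
      have hr : r = j :: js := by simpa [List.getD_eq_getElem?_getD] using h
      subst hr
      simp
    | succ k =>
      have ihk := ih (k := k) (by simpa [List.getD_eq_getElem?_getD] using h)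
      simp only [List.set, List.flatten_cons]
      exact (List.Perm.append_left r ihk).trans List.perm_middle

lemma pvMerge_sorted (A : List Int) (rem : List (List Int)) (heap : List (Int × Nat))
    (res : List Int) :
    res.Pairwise (· ≤ ·) →
    (∀ x ∈ res, ∀ h ∈ heap, x ≤ h.1) →
    (∀ h ∈ heap, ∀ j ∈ rem.getD h.2 [], h.1 ≤ pvVal A j) →
    (∀ r ∈ rem, (r.map (pvVal A)).Pairwise (· ≤ ·)) →
    (pvMerge A rem heap res).Pairwise (· ≤ ·) := by
  induction rem, heap, res using pvMerge.induct (A := A) with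
  | case1 rem res =>
    intro h1 _ _ _
    simpa [pvMerge] using h1
  | case2 rem res x t p hrem ih =>
    intro h1 h2 h3 h4
    have hp : p = pvPopMin x t := rfl
    clear_value p
    subst hp
    have hmin := pvPopMin_least x t
    have hmem : (pvPopMin x t).1 ∈ x :: t := (pvPopMin_perm x t).subset (by simp)
    have hsub : ∀ z ∈ (pvPopMin x t).2, z ∈ x :: t := fun z hz => pvPopMin_mem x t hz
    rw [pvMerge]
    split
    · apply ih
      · refine List.pairwise_append.mpr ⟨h1, by simp, ?_⟩
        intro a ha b hb
        have hb' : b = (pvPopMin x t).1.1 := by simpa using hb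
        subst hb'
        exact h2 a ha _ hmem
      · intro a ha h hh
        rcases List.mem_append.mp ha with ha' | ha'
        · exact h2 a ha' h (hsub h hh)
        · have ha'' : a = (pvPopMin x t).1.1 := by simpa using ha'
          subst ha''
          exact pvLexLe_val (hmin h (hsub h hh))
      · intro h hh
        exact h3 h (hsub h hh)
      · exact h4
    · rename_i j js heq
      rw [hrem] at heq
      simp at heq
  | case3 rem res x t p j js hrem ih =>
    intro h1 h2 h3 h4
    have hp : p = pvPopMin x t := rfl
    clear_value p
    subst hp
    have hmin := pvPopMin_least x t
    have hmem : (pvPopMin x t).1 ∈ x :: t := (pvPopMin_perm x t).subset (by simp)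
    have hsub : ∀ z ∈ (pvPopMin x t).2, z ∈ x :: t := fun z hz => pvPopMin_mem x t hz
    have hk : (pvPopMin x t).1.2 < rem.length := pv_getD_ne_nil_lt (by rw [hrem]; simp)
    have hrun : (pvVal A j :: js.map (pvVal A)).Pairwise (· ≤ ·) := by
      have := h4 _ (pv_getD_mem hk)
      rw [hrem, List.map_cons] at this
      exact this
    have hjle : ∀ j' ∈ js, pvVal A j ≤ pvVal A j' := by
      intro j' hj'
      exact (List.pairwise_cons.mp hrun).1 (pvVal A j') (List.mem_map_of_mem hj')
    have hvj : (pvPopMin x t).1.1 ≤ pvVal A j :=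
      h3 _ hmem j (by rw [hrem]; simp)
    rw [pvMerge]
    split
    · rename_i heq
      rw [hrem] at heq
      simp at heq
    · rename_i j' js' heq
      rw [hrem] at heq
      obtain ⟨rfl, rfl⟩ : j = j' ∧ js = js' := by
        simpa using heq
      apply ih
      · refine List.pairwise_append.mpr ⟨h1, by simp, ?_⟩
        intro a ha b hb
        have hb' : b = (pvPopMin x t).1.1 := by simpa using hb
        subst hb'
        exact h2 a ha _ hmem
      · intro a ha h hh
        rcases List.mem_append.mp hh with hh' | hh'
        · rcases List.mem_append.mp ha with ha' | ha'
          · exact h2 a ha' h (hsub h hh')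
          · have ha'' : a = (pvPopMin x t).1.1 := by simpa using ha'
            subst ha''
            exact pvLexLe_val (hmin h (hsub h hh'))
        · have hh'' : h = (pvVal A j, (pvPopMin x t).1.2) := by simpa using hh'
          subst hh''
          rcases List.mem_append.mp ha with ha' | ha'
          · exact le_trans (h2 a ha' _ hmem) hvj
          · have ha'' : a = (pvPopMin x t).1.1 := by simpa using ha'
            subst ha''
            exact hvj
      · intro h hh j' hj'
        rcases List.mem_append.mp hh with hh' | hh'
        · by_cases hkk : h.2 = (pvPopMin x t).1.2
          · rw [hkk, pv_getD_set_self hk] at hj'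
            have hle : h.1 ≤ pvVal A j := by
              have := h3 h (hsub h hh') j
              rw [hkk, hrem] at this
              exact this (by simp)
            exact le_trans hle (hjle j' hj')
          · rw [pv_getD_set_ne (fun hcontra => hkk hcontra.symm) js] at hj'
            exact h3 h (hsub h hh') j' hj'
        · have hh'' : h = (pvVal A j, (pvPopMin x t).1.2) := by simpa using hh'
          subst hh''
          rw [pv_getD_set_self hk] at hj'
          exact hjle j' hj'
      · intro r hr
        rcases List.mem_or_eq_of_mem_set hr with hr' | hr'
        · exact h4 r hr'
        · subst hr'
          exact (List.pairwise_cons.mp hrun).2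

lemma pvMerge_perm (A : List Int) (rem : List (List Int)) (heap : List (Int × Nat))
    (res : List Int) :
    (∀ k, k < rem.length → rem.getD k [] ≠ [] → ∃ v, (v, k) ∈ heap) →
    (pvMerge A rem heap res).Perm
      (res ++ heap.map (·.1) ++ (rem.flatten.map (pvVal A))) := by
  induction rem, heap, res using pvMerge.induct (A := A) with
  | case1 rem res =>
    intro h5
    have hflat : rem.flatten = [] := by
      rw [List.flatten_eq_nil_iff]
      intro r hr
      obtain ⟨k, hk, rfl⟩ := List.getElem_of_mem hr
      by_contra hne
      obtain ⟨v, hv⟩ := h5 k hk (by rwa [List.getD_eq_getElem?_getD, List.getElem?_eq_getElem hk])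
      simp at hv
    simp [pvMerge, hflat]
  | case2 rem res x t p hrem ih =>
    intro h5
    have hp : p = pvPopMin x t := rfl
    clear_value p
    subst hp
    have hperm := pvPopMin_perm x t
    rw [pvMerge]
    split
    · have h5' : ∀ k, k < rem.length → rem.getD k [] ≠ [] → ∃ v, (v, k) ∈ (pvPopMin x t).2 := by
        intro k hk hne
        obtain ⟨v, hv⟩ := h5 k hk hne
        have hv' := hperm.mem_iff.mpr hv
        rcases List.mem_cons.mp hv' with heq | hmem2
        · exfalso
          apply hne
          rw [← heq] at hrem
          exact hrem
        · exact ⟨v, hmem2⟩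
      have key := ih h5'
      rw [List.perm_iff_count]
      intro z
      have c1 := key.count_eq z
      have c2 := (hperm.map (·.1)).count_eq z
      simp [List.count_append, List.count_cons] at c1 c2 ⊢
      omega
    · rename_i j js heq
      rw [hrem] at heq
      simp at heq
  | case3 rem res x t p j js hrem ih =>
    intro h5
    have hp : p = pvPopMin x t := rfl
    clear_value p
    subst hp
    have hperm := pvPopMin_perm x t
    have hk : (pvPopMin x t).1.2 < rem.length := pv_getD_ne_nil_lt (by rw [hrem]; simp)
    rw [pvMerge]
    split
    · rename_i heq
      rw [hrem] at heq
      simp at heq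
    · rename_i j' js' heq
      rw [hrem] at heq
      obtain ⟨rfl, rfl⟩ : j = j' ∧ js = js' := by
        simpa using heq
      have h5' : ∀ k, k < (rem.set (pvPopMin x t).1.2 js).length →
          (rem.set (pvPopMin x t).1.2 js).getD k [] ≠ [] →
          ∃ v, (v, k) ∈ (pvPopMin x t).2 ++ [(pvVal A j, (pvPopMin x t).1.2)] := by
        intro k hk' hne
        rw [List.length_set] at hk'
        by_cases hkk : k = (pvPopMin x t).1.2
        · subst hkk
          exact ⟨pvVal A j, by simp⟩
        · rw [pv_getD_set_ne (fun hcontra => hkk hcontra.symm) js] at hne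
          obtain ⟨v, hv⟩ := h5 k hk' hne
          have hv' := hperm.mem_iff.mpr hv
          rcases List.mem_cons.mp hv' with heq2 | hmem2
          · exfalso
            apply hkk
            rw [← heq2]
          · exact ⟨v, by simp [hmem2]⟩
      have key := ih h5'
      have hfl := pv_flatten_set hrem
      rw [List.perm_iff_count]
      intro z
      have c1 := key.count_eq z
      have c2 := (hperm.map (·.1)).count_eq z
      have c3 := (hfl.map (pvVal A)).count_eq z
      simp [List.count_append, List.count_cons] at c1 c2 c3 ⊢
      omega

lemma pv_enumerate_map_snd {α : Type} (l : List α) (d : Int) :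
    (PySem.List.enumerate l d).map Prod.snd = l := by
  induction l generalizing d with
  | nil => rfl
  | cons a l ih => simp [PySem.List.enumerate, ih]

lemma pv_enumerate_mem {α : Type} {l : List α} {d : Int} {p : Int × α}
    (hp : p ∈ PySem.List.enumerate l d) :
    ∃ k : Nat, ∃ hk : k < l.length, p = (d + k, l[k]'hk) := by
  induction l generalizing d with
  | nil => simp [PySem.List.enumerate] at hp
  | cons a l ih =>
    rw [PySem.List.enumerate] at hp
    rcases List.mem_cons.mp hp with rfl | hp'
    · exact ⟨0, by simp, by simp⟩
    · obtain ⟨k, hk, hpe⟩ := ih hp'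
      refine ⟨k + 1, by simp [hk], ?_⟩
      rw [hpe]
      refine Prod.ext ?_ (by simp)
      simp
      omega

lemma pv_enumerate_mem' {α : Type} (l : List α) (d : Int) (k : Nat) (hk : k < l.length) :
    ((d + k : Int), l[k]'hk) ∈ PySem.List.enumerate l d := by
  induction l generalizing d k with
  | nil => simp at hk
  | cons a l ih =>
    rw [PySem.List.enumerate]
    cases k with
    | zero => simp
    | succ k =>
      refine List.mem_cons_of_mem _ ?_
      have := ih (d + 1) k (by simpa using hk)
      have harith : d + 1 + (k : Int) = d + ((k : Nat) + 1 : Nat) := by push_cast; omega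
      rw [harith] at this
      simpa using this

lemma pv_heads_tails (A : List Int) (runs : List (List Int))
    (hne : ∀ r ∈ runs, r ≠ []) :
    (runs.map (fun r => pvVal A (r.headD 0)) ++
      ((runs.map (fun r => r.drop 1)).flatten.map (pvVal A))).Perm
      (runs.flatten.map (pvVal A)) := by
  induction runs with
  | nil => simp
  | cons r rs ih =>
    have hr : r ≠ [] := hne r (by simp)
    cases r with
    | nil => exact absurd rfl hr
    | cons c tl =>
      have ihr := ih (fun r hrm => hne r (by simp [hrm]))
      rw [List.perm_iff_count]
      intro z
      have := ihr.count_eq z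
      simp [List.count_append, List.count_cons] at this ⊢
      omega

theorem sort_k_increasing_decreasing_array_spec :
    Claim_equal_sort_k_increasing_decreasing_array := by
  intro A _ hA
  unfold Spec_sort_k_increasing_decreasing_array
  unfold sort_k_increasing_decreasing_array sort_k_increasing_decreasing_array_alt
  obtain ⟨hr, hperm⟩ := pvRuns_spec hA
  set runs := pvRuns A with hruns_def
  set heap := (PySem.List.enumerate runs).map (fun p => (pvVal A (p.2.headD 0), p.1.toNat))
    with hheap_def
  set rem := runs.map (fun r => r.drop 1) with hrem_def
  have hrem_len : rem.length = runs.length := by simp [hrem_def]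
  have hH : ∀ h ∈ heap, ∃ k : Nat, ∃ hk : k < runs.length,
      h = (pvVal A ((runs[k]'hk).headD 0), k) := by
    intro h hh
    obtain ⟨p, hp, rfl⟩ := List.mem_map.mp hh
    obtain ⟨k, hk, rfl⟩ := pv_enumerate_mem hp
    exact ⟨k, hk, by simp⟩
  have hK : ∀ k : Nat, ∀ hk : k < runs.length,
      (pvVal A ((runs[k]'hk).headD 0), k) ∈ heap := by
    intro k hk
    have := pv_enumerate_mem' runs 0 k hk
    have hmem := List.mem_map_of_mem (f := fun p => (pvVal A (p.2.headD 0), p.1.toNat)) this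
    have hsimp : (fun p : Int × List Int => (pvVal A (p.2.headD 0), p.1.toNat))
        ((0 + (k : Int)), runs[k]'hk) = (pvVal A ((runs[k]'hk).headD 0), k) := by simp
    rwa [hsimp] at hmem
  have hremk : ∀ k : Nat, ∀ hk : k < runs.length, rem.getD k [] = (runs[k]'hk).drop 1 := by
    intro k hk
    rw [List.getD_eq_getElem?_getD, hrem_def, List.getElem?_map]
    rw [List.getElem?_eq_getElem hk]
    rfl
  have hpair : (pvMerge A rem heap []).Pairwise (· ≤ ·) := by
    apply pvMerge_sorted
    · simp
    · simp
    · intro h hh j hj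
      obtain ⟨k, hk, rfl⟩ := hH h hh
      rw [hremk k hk] at hj
      obtain ⟨hne, hpw⟩ := hr (runs[k]'hk) (List.getElem_mem hk)
      cases hcase : runs[k]'hk with
      | nil => exact absurd hcase hne
      | cons c tl =>
        rw [hcase] at hj hpw
        simp only [List.headD_cons]
        simp only [List.drop_succ_cons, List.drop_zero] at hj
        rw [List.map_cons] at hpw
        exact (List.pairwise_cons.mp hpw).1 (pvVal A j) (List.mem_map_of_mem hj)
    · intro r hrm
      obtain ⟨r0, hr0, rfl⟩ := List.mem_map.mp hrm
      have hpw := (hr r0 hr0).2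
      rw [List.map_drop]
      exact hpw.drop
  have hout : (pvMerge A rem heap []).Perm
      ([] ++ heap.map (·.1) ++ (rem.flatten.map (pvVal A))) := by
    apply pvMerge_perm
    intro k hk hne
    have hk' : k < runs.length := by rwa [hrem_len] at hk
    exact ⟨pvVal A ((runs[k]'hk').headD 0), hK k hk'⟩
  have hheads : heap.map (·.1) = runs.map (fun r => pvVal A (r.headD 0)) := by
    rw [hheap_def, List.map_map]
    have : ((fun x : Int × Nat => x.1) ∘ fun p : Int × List Int =>
        (pvVal A (p.2.headD 0), p.1.toNat)) = (fun r => pvVal A (r.headD 0)) ∘ Prod.snd := rfl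
    rw [this, ← List.map_map, pv_enumerate_map_snd]
  have hht := pv_heads_tails A runs (fun r hrm => (hr r hrm).1)
  have hA' : (runs.flatten.map (pvVal A)).Perm A := by
    have := hperm.map (pvVal A)
    have heqA : (PySem.List.pyRange 0 (PySem.List.len A)).map (pvVal A) = A :=
      PySem.List.map_pyGetD_pyRange_zero A 0
    rwa [heqA] at this
  have hfinal : (pvMerge A rem heap []).Perm A := by
    refine hout.trans ?_
    rw [List.nil_append, hheads]
    exact (hht.trans hA')
  exact (PySem.List.sorted_id_eq_of_perm_of_pairwise A _ hfinal hpair).symm
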